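-- pv_equiv track=rewrite | github.com/mshtelma/databricks-deep-research-agent | agent/deep_research_agent/agents/researcher.py | _clean_queries
-- ===== SOURCE A (Python) =====
-- from typing import Dict, Any, Optional, List, Literal
--
-- def _clean_queries(queries: List[str], max_queries: int) -> List[str]:
--     """Clean, deduplicate, and limit queries."""
--     cleaned = []
--     seen = set()
--
--     for query in queries:
--         # Clean the query
--         clean_query = ' '.join(query.split())  # Remove extra whitespace/newlines
--         clean_query = clean_query.strip(' .,!?;:')  # Remove trailing punctuation
--
--         # Skip if too short, too long, or duplicate
--         if len(clean_query) < 5 or len(clean_query) > 200: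
--             continue
--
--         # Normalize for duplicate detection
--         normalized = clean_query.lower()
--         if normalized not in seen:
--             seen.add(normalized)
--             cleaned.append(clean_query)
--
--         if len(cleaned) >= max_queries:
--             break
--
--     return cleaned
-- ===== SOURCE B (Python) =====
-- from typing import List
--
--
-- def _clean_queries(queries: List[str], max_queries: int) -> List[str]:
--     """Clean, deduplicate, and limit queries."""
--     cleaned = [' '.join(q.split()).strip(' .,!?;:') for q in queries]
--     valid = [c for c in cleaned if 5 <= len(c) <= 200]
--     unique = {}
--     for c in valid:
--         unique.setdefault(c.lower(), c)
--     return list(unique.values())[:max_queries]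
-- ===== Notes on version B (the rewrite author's own statement) =====
-- stated objective: idiomatic
-- what changed: Replaced A's single fused loop (clean/filter/dedupe/early-break with a mutable seen-set) by a staged pipeline: clean all queries with a comprehension, filter by length, dedupe case-insensitively via dict.setdefault, then slice to the limit; Pre_ requires 0 <= max_queries because a negative limit is outside the task's natural domain (A's one-item result there is an accident of its break placement, B's Python slice drops from the end).
-- intended difference: When max_queries = 0 and at least one query survives cleaning and the length filter, A still returns that one item (it appends before checking the limit) while B returns [], which is what a limit of 0 means. — e.g. on _clean_queries(["hello world"], 0): A returns ["hello world"], B returns []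
-- outside the precondition, e.g. on _clean_queries(['hello world'], -1): A returns ['hello world'], B returns []
import Mathlib
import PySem

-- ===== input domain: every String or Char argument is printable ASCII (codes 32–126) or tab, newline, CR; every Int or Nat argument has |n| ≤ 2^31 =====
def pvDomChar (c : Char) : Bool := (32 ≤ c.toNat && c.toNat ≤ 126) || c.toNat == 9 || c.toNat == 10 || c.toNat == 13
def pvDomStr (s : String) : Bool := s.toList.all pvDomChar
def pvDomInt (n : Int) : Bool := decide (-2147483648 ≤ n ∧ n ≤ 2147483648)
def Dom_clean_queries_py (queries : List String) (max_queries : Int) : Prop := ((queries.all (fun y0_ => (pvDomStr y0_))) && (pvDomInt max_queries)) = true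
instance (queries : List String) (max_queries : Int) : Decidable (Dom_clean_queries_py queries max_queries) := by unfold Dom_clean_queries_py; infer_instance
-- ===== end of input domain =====

-- B restructures A's fused loop (clean/filter/dedupe/break in one pass) as a staged
-- pipeline: clean all, filter by length, dedupe via dict.setdefault, slice to the
-- limit; same return value on 0 < max_queries, and [] (the intended value) where
-- max_queries = 0; no speed claim.

-- ===== PORT A =====
-- ' '.join(query.split()).strip(' .,!?;:')  (shared cleaning expression of both Pythons)
def pvCleanQ (query : String) : String :=
  PySem.Str.stripChars (PySem.Str.join " " (PySem.Str.split₀ query)) " .,!?;:"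

-- A's for-loop with its early break, as structural recursion over (cleaned, seen)
def pvLoopA (mq : Int) : List String → List String → PySem.Set String → List String
  | [], cleaned, _ => cleaned
  | query :: rest, cleaned, seen =>
    let clean_query := pvCleanQ query
    if PySem.Str.len clean_query < 5 ∨ 200 < PySem.Str.len clean_query then
      pvLoopA mq rest cleaned seen                       -- continue
    else
      let normalized := PySem.Str.lower clean_query
      let st :=
        if PySem.Set.contains seen normalized then (cleaned, seen)
        else (cleaned ++ [clean_query], PySem.Set.add seen normalized)
      if mq ≤ (st.1.length : Int) then st.1              -- break
      else pvLoopA mq rest st.1 st.2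

def clean_queries_py (queries : List String) (max_queries : Int) : List String :=
  pvLoopA max_queries queries [] PySem.Set.empty

-- ===== PORT B =====
def clean_queries_py_alt (queries : List String) (max_queries : Int) : List String :=
  let cleaned := queries.map pvCleanQ
  let valid := cleaned.filter (fun c => decide (5 ≤ PySem.Str.len c) && decide (PySem.Str.len c ≤ 200))
  let unique := valid.foldl (fun d c => d.setdefault (PySem.Str.lower c) c)
                  (PySem.Dict.empty : PySem.Dict String String)
  PySem.List.slice (PySem.Dict.values unique) none (some max_queries)

-- ===== PRECONDITION & SPEC =====
-- Pre_ requires 0 ≤ max_queries: a negative limit is outside the task's natural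
-- domain — A's one-item result there is an accident of its break placement, while
-- B's Python slice drops items from the end.
def Pre_clean_queries_py (_queries : List String) (max_queries : Int) : Prop :=
  0 ≤ max_queries
instance (queries : List String) (max_queries : Int) : Decidable (Pre_clean_queries_py queries max_queries) := by unfold Pre_clean_queries_py; infer_instance
def pvWitness_clean_queries_py : List String × Int := (["hello world", "hello  WORLD!", "abc"], 3)

-- When max_queries = 0 and at least one query survives cleaning and the length
-- filter, A still returns that one item (it appends before checking the limit)
-- while B returns [], which is what a limit of 0 means.
def D_clean_queries_py (queries : List String) (max_queries : Int) : Prop :=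
  max_queries = 0 ∧
    queries.any (fun q => decide (5 ≤ PySem.Str.len (pvCleanQ q)) &&
      decide (PySem.Str.len (pvCleanQ q) ≤ 200)) = true
instance (queries : List String) (max_queries : Int) : Decidable (D_clean_queries_py queries max_queries) := by unfold D_clean_queries_py; infer_instance

def Spec_clean_queries_py (queries : List String) (max_queries : Int) (out : List String) : Prop := ¬ D_clean_queries_py queries max_queries → out = clean_queries_py_alt queries max_queries
instance (queries : List String) (max_queries : Int) (out : List String) : Decidable (Spec_clean_queries_py queries max_queries out) := by unfold Spec_clean_queries_py; infer_instance

def pvDiffWitness_clean_queries_py : List String × Int := (["hello world"], 0)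
def pvDiffWitnessOut_clean_queries_py : (List String) × (List String) := (["hello world"], [])

-- ===== CLAIM (what is proved, stated in full; the proofs are below) =====
def Claim_unchanged_clean_queries_py : Prop := ∀ (queries : List String) (max_queries : Int), Dom_clean_queries_py queries max_queries → Pre_clean_queries_py queries max_queries → Spec_clean_queries_py queries max_queries (clean_queries_py queries max_queries)
def Claim_changed_clean_queries_py : Prop := Dom_clean_queries_py (pvDiffWitness_clean_queries_py.1) (pvDiffWitness_clean_queries_py.2) ∧ Pre_clean_queries_py (pvDiffWitness_clean_queries_py.1) (pvDiffWitness_clean_queries_py.2) ∧ D_clean_queries_py (pvDiffWitness_clean_queries_py.1) (pvDiffWitness_clean_queries_py.2) ∧ clean_queries_py (pvDiffWitness_clean_queries_py.1) (pvDiffWitness_clean_queries_py.2) = pvDiffWitnessOut_clean_queries_py.1 ∧ clean_queries_py_alt (pvDiffWitness_clean_queries_py.1) (pvDiffWitness_clean_queries_py.2) = pvDiffWitnessOut_clean_queries_py.2 ∧ pvDiffWitnessOut_clean_queries_py.1 ≠ pvDiffWitnessOut_clean_queries_py.2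
def Claim_exact_clean_queries_py : Prop := ∀ (queries : List String) (max_queries : Int), Dom_clean_queries_py queries max_queries → Pre_clean_queries_py queries max_queries → D_clean_queries_py queries max_queries → clean_queries_py queries max_queries ≠ clean_queries_py_alt queries max_queries

-- ===== LEMMAS AND PROOFS =====

-- proof-only reference: case-insensitive dedup of a stream against a key list
def pvDedup : List String → List String → List String
  | [], _ => []
  | c :: rest, keys =>
    if PySem.Str.lower c ∈ keys then pvDedup rest keys
    else c :: pvDedup rest (PySem.Str.lower c :: keys)

theorem pvDedup_congr (xs : List String) (k₁ k₂ : List String)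
    (h : ∀ n, n ∈ k₁ ↔ n ∈ k₂) : pvDedup xs k₁ = pvDedup xs k₂ := by
  induction xs generalizing k₁ k₂ with
  | nil => rfl
  | cons c rest ih =>
    simp only [pvDedup]
    by_cases hm : PySem.Str.lower c ∈ k₁
    · rw [if_pos hm, if_pos ((h _).mp hm)]; exact ih _ _ h
    · rw [if_neg hm, if_neg (fun hh => hm ((h _).mpr hh))]
      refine congrArg _ (ih _ _ ?_)
      intro n; simp only [List.mem_cons]; exact or_congr Iff.rfl (h n)

-- B's setdefault loop produces exactly pvDedup of its input against the dict's keys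
theorem pvFold_values (xs : List String) (d : PySem.Dict String String)
    (hnd : d.keys.Nodup) :
    PySem.Dict.values (xs.foldl (fun d c => d.setdefault (PySem.Str.lower c) c) d)
      = d.values ++ pvDedup xs d.keys := by
  induction xs generalizing d with
  | nil => simp [pvDedup]
  | cons c rest ih =>
    simp only [List.foldl_cons, pvDedup]
    by_cases hc : d.contains (PySem.Str.lower c) = true
    · rw [PySem.Dict.setdefault_of_contains d c hc,
        if_pos ((PySem.Dict.contains_iff_mem_keys _ _).mp hc)]
      exact ih d hnd
    · have hc' : d.contains (PySem.Str.lower c) = false := by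
        simpa using hc
      rw [PySem.Dict.setdefault_of_not_contains d c hc',
        if_neg (fun hm => hc ((PySem.Dict.contains_iff_mem_keys _ _).mpr hm))]
      rw [ih _ (PySem.Dict.nodup_keys_insert _ _ _ hnd)]
      have hkeys := PySem.Dict.keys_insert_of_not_contains d c hc'
      have hvals : (d.insert (PySem.Str.lower c) c).values = d.values ++ [c] := by
        simp only [PySem.Dict.values,
          PySem.Dict.items_insert_of_not_contains d c hc', List.map_append,
          List.map_cons, List.map_nil]
      rw [hvals, hkeys, List.append_assoc]
      refine congrArg _ (congrArg _ (pvDedup_congr _ _ _ ?_))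
      intro n; simp [or_comm]

-- A's loop, under its invariants, takes a prefix of the deduped valid stream
theorem pvLoopA_eq (mq : Int) (qs : List String) (cleaned : List String)
    (seen : PySem.Set String)
    (hseen : ∀ n, PySem.Set.contains seen n = true ↔ n ∈ cleaned.map PySem.Str.lower)
    (hlen : cleaned.length < (max mq 1).toNat) :
    pvLoopA mq qs cleaned seen
      = cleaned ++ (pvDedup
          ((qs.map pvCleanQ).filter
            (fun c => decide (5 ≤ PySem.Str.len c) && decide (PySem.Str.len c ≤ 200)))
          (cleaned.map PySem.Str.lower)).take ((max mq 1).toNat - cleaned.length) := by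
  induction qs generalizing cleaned seen with
  | nil => simp [pvLoopA, pvDedup]
  | cons q rest ih =>
    simp only [pvLoopA, List.map_cons, List.filter_cons]
    by_cases hv : PySem.Str.len (pvCleanQ q) < 5 ∨ 200 < PySem.Str.len (pvCleanQ q)
    · -- invalid: continue; the filter drops it too
      rw [if_pos hv]
      have hf : (decide (5 ≤ PySem.Str.len (pvCleanQ q)) &&
          decide (PySem.Str.len (pvCleanQ q) ≤ 200)) = false := by
        rw [Bool.and_eq_false_iff, decide_eq_false_iff_not, decide_eq_false_iff_not]
        omega
      rw [hf, if_neg (by simp)]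
      exact ih cleaned seen hseen hlen
    · rw [if_neg hv]
      push Not at hv
      have hvB : (decide (5 ≤ PySem.Str.len (pvCleanQ q)) &&
          decide (PySem.Str.len (pvCleanQ q) ≤ 200)) = true := by
        rw [Bool.and_eq_true, decide_eq_true_iff, decide_eq_true_iff]
        exact hv
      rw [hvB, if_pos rfl]
      by_cases hdup : PySem.Set.contains seen (PySem.Str.lower (pvCleanQ q)) = true
      · -- duplicate: nothing appended; break cannot fire
        rw [if_pos hdup]
        have hmem : PySem.Str.lower (pvCleanQ q) ∈ cleaned.map PySem.Str.lower :=
          (hseen _).mp hdup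
        have hne : cleaned ≠ [] := by
          intro h; rw [h] at hmem; simp at hmem
        have h1 : 1 ≤ cleaned.length := by
          cases cleaned with
          | nil => exact absurd rfl hne
          | cons _ _ => simp
        have hnb : ¬ mq ≤ (cleaned.length : Int) := by
          intro h; omega
        rw [if_neg hnb]
        simp only [pvDedup, if_pos hmem]
        exact ih cleaned seen hseen hlen
      · -- fresh: append, then break iff the limit is reached
        rw [if_neg hdup]
        simp only [pvDedup,
          if_neg (fun hm => hdup ((hseen _).mpr hm))]
        by_cases hbrk : mq ≤ ((cleaned ++ [pvCleanQ q]).length : Int)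
        · rw [if_pos hbrk]
          have h1 : (max mq 1).toNat - cleaned.length = 1 := by
            rw [List.length_append, List.length_singleton] at hbrk
            push_cast at hbrk; omega
          rw [h1, List.take_succ_cons, List.take_zero]
        · rw [if_neg hbrk]
          have hlen' : (cleaned ++ [pvCleanQ q]).length < (max mq 1).toNat := by
            rw [List.length_append, List.length_singleton] at hbrk ⊢
            push_cast at hbrk; omega
          have hseen' : ∀ n,
              PySem.Set.contains (PySem.Set.add seen (PySem.Str.lower (pvCleanQ q))) n = true
                ↔ n ∈ (cleaned ++ [pvCleanQ q]).map PySem.Str.lower := by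
            intro n
            rw [PySem.Set.contains_iff _ _, PySem.Set.mem_add]
            simp only [List.map_append, List.map_cons, List.map_nil, List.mem_append,
              List.mem_cons, List.not_mem_nil, or_false]
            constructor
            · rintro (h | h)
              · exact Or.inl ((hseen n).mp ((PySem.Set.contains_iff _ _).mpr h))
              · exact Or.inr h
            · rintro (h | h)
              · exact Or.inl ((PySem.Set.contains_iff _ _).mp ((hseen n).mpr h))
              · exact Or.inr h
          rw [ih _ _ hseen' hlen']
          rw [pvDedup_congr _ ((cleaned ++ [pvCleanQ q]).map PySem.Str.lower)
            (PySem.Str.lower (pvCleanQ q) :: cleaned.map PySem.Str.lower)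
            (by intro n; simp [or_comm])]
          have hsub : (max mq 1).toNat - cleaned.length
              = ((max mq 1).toNat - (cleaned ++ [pvCleanQ q]).length) + 1 := by
            rw [List.length_append, List.length_singleton] at hlen' ⊢
            omega
          rw [hsub, List.take_succ_cons]
          simp

-- A as a closed expression: take ((max mq 1).toNat) of the deduped valid stream
theorem pvA_closed (queries : List String) (mq : Int) :
    clean_queries_py queries mq
      = (pvDedup ((queries.map pvCleanQ).filter
          (fun c => decide (5 ≤ PySem.Str.len c) && decide (PySem.Str.len c ≤ 200)))
          []).take ((max mq 1).toNat) := by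
  rw [clean_queries_py,
    pvLoopA_eq mq queries [] PySem.Set.empty
      (by intro n; simp [PySem.Set.empty, PySem.Set.contains]) (by simp)]
  simp

-- B as a closed expression: take mq.toNat of the same stream (for 0 ≤ mq)
theorem pvB_closed (queries : List String) (mq : Int) (hmq : 0 ≤ mq) :
    clean_queries_py_alt queries mq
      = (pvDedup ((queries.map pvCleanQ).filter
          (fun c => decide (5 ≤ PySem.Str.len c) && decide (PySem.Str.len c ≤ 200)))
          []).take mq.toNat := by
  simp only [clean_queries_py_alt]
  rw [pvFold_values _ _ PySem.Dict.nodup_keys_empty,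
    PySem.List.slice_to _ hmq]
  simp [PySem.Dict.values, PySem.Dict.empty, PySem.Dict.keys]

-- ¬D with mq = 0 means no query survives the filter
theorem pvFilter_nil_of_not_any (queries : List String)
    (h : queries.any (fun q => decide (5 ≤ PySem.Str.len (pvCleanQ q)) &&
      decide (PySem.Str.len (pvCleanQ q) ≤ 200)) ≠ true) :
    (queries.map pvCleanQ).filter
      (fun c => decide (5 ≤ PySem.Str.len c) && decide (PySem.Str.len c ≤ 200)) = [] := by
  rw [List.filter_eq_nil_iff]
  intro c hc
  rcases List.mem_map.mp hc with ⟨q, hq, rfl⟩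
  intro hp
  exact h (List.any_eq_true.mpr ⟨q, hq, hp⟩)

-- ===== VERDICT (by name: the statement is the Claim_ definition above) =====
theorem clean_queries_py_spec : Claim_unchanged_clean_queries_py := by
  intro queries mq _hdom hpre hnd
  unfold Pre_clean_queries_py at hpre
  rw [pvA_closed, pvB_closed queries mq hpre]
  by_cases h0 : mq = 0
  · subst h0
    have hany : queries.any (fun q => decide (5 ≤ PySem.Str.len (pvCleanQ q)) &&
        decide (PySem.Str.len (pvCleanQ q) ≤ 200)) ≠ true := by
      intro hA; exact hnd ⟨rfl, hA⟩
    rw [pvFilter_nil_of_not_any queries hany]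
    simp [pvDedup]
  · have : max mq 1 = mq := by omega
    rw [this]

theorem clean_queries_py_changed : Claim_changed_clean_queries_py := by
  unfold Claim_changed_clean_queries_py; decide

theorem clean_queries_py_tight : Claim_exact_clean_queries_py := by
  intro queries mq _hdom _hpre hD heq
  obtain ⟨h0, hany⟩ := hD
  subst h0
  rw [pvA_closed, pvB_closed queries 0 le_rfl] at heq
  rcases List.any_eq_true.mp hany with ⟨q, hq, hp⟩
  have hmem : pvCleanQ q ∈ (queries.map pvCleanQ).filter
      (fun c => decide (5 ≤ PySem.Str.len c) && decide (PySem.Str.len c ≤ 200)) :=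
    List.mem_filter.mpr ⟨List.mem_map_of_mem hq, hp⟩
  revert heq
  cases hF : (queries.map pvCleanQ).filter
      (fun c => decide (5 ≤ PySem.Str.len c) && decide (PySem.Str.len c ≤ 200)) with
  | nil => rw [hF] at hmem; simp at hmem
  | cons c rest =>
    simp [pvDedup]
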